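-- pv_equiv track=rewrite | github.com/gerssivaldosantos/exercicios-python | gerenciar-bandas/exercicio.py | analisar_combinacoes
-- ===== SOURCE A (Python) =====
-- def analisar_combinacoes(ids, n):
--     if n == 0:
--         return [[]]
--
--     combinacoes =[]
--
--     for i in range(0, len(ids)):
--
--         m = ids[i]
--         remIds = ids[i + 1:]
--
--         restanteIds_combo = analisar_combinacoes(remIds, n-1)
--         for p in restanteIds_combo:
--             combinacao_id = [m, *p]
--             combinacoes.append(combinacao_id)
--
--     return combinacoes
-- ===== SOURCE B (Python) =====
-- def analisar_combinacoes(ids, n):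
--     # include/exclude binary recursion on the list head instead of A's
--     # index loop over all suffixes with slicing
--     if n == 0:
--         return [[]]
--     if not ids:
--         return []
--     x = ids[0]
--     rest = ids[1:]
--     with_x = [[x, *p] for p in analisar_combinacoes(rest, n - 1)]
--     return with_x + analisar_combinacoes(rest, n)
-- ===== Notes on version B (the rewrite author's own statement) =====
-- stated objective: alternative
-- what changed: Replaced A's index loop over all suffixes (range + slicing ids[i+1:]) with an include/exclude binary recursion on the list head, which produces the same lexicographic-by-position order without any indexing or slicing.
import Mathlib
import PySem

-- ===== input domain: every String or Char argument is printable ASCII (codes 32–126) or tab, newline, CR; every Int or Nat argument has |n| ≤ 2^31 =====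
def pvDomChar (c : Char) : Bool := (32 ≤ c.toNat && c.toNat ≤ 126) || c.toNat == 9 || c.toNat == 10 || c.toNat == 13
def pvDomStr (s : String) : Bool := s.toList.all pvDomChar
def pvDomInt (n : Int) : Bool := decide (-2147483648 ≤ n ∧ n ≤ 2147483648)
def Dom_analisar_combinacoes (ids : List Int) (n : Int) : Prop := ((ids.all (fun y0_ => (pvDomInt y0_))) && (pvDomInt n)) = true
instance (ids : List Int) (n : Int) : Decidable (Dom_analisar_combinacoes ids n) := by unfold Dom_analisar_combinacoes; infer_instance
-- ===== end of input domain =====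

-- B replaces A's index loop over all suffixes (range + slicing) by an include/exclude
-- binary recursion on the list head; same values, objective: alternative decomposition.

-- ===== PORT A =====
-- A: 'for i in range(0, len(ids))' with m = ids[i] (i < len, exact as getD),
-- remIds = ids[i+1:] (i+1 ≥ 0, exact as List.drop), recursion on the slice;
-- attach carries i < len for termination only.
def analisar_combinacoes (ids : List Int) (n : Int) : List (List Int) :=
  if n = 0 then [[]]
  else
    (List.range ids.length).attach.foldl
      (fun combinacoes i =>
        let m := ids.getD i.1 0
        let remIds := ids.drop (i.1 + 1)
        let restanteIds_combo := analisar_combinacoes remIds (n - 1)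
        combinacoes ++ restanteIds_combo.map (fun p => m :: p))
      []
termination_by ids.length
decreasing_by
  have := i.2
  simp only [List.mem_range] at this
  simp only [List.length_drop]
  omega

-- ===== PORT B =====
def analisar_combinacoes_alt (ids : List Int) (n : Int) : List (List Int) :=
  if n = 0 then [[]]
  else
    match ids with
    | [] => []
    | x :: rest =>
      (analisar_combinacoes_alt rest (n - 1)).map (fun p => x :: p)
        ++ analisar_combinacoes_alt rest n

-- ===== PRECONDITION & SPEC =====
def Spec_analisar_combinacoes (ids : List Int) (n : Int) (out : List (List Int)) : Prop := out = analisar_combinacoes_alt ids n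
instance (ids : List Int) (n : Int) (out : List (List Int)) : Decidable (Spec_analisar_combinacoes ids n out) := by unfold Spec_analisar_combinacoes; infer_instance

-- ===== CLAIM (what is proved, stated in full; the proofs are below) =====
def Claim_equal_analisar_combinacoes : Prop := ∀ (ids : List Int) (n : Int), Dom_analisar_combinacoes ids n → Spec_analisar_combinacoes ids n (analisar_combinacoes ids n)

-- ===== LEMMAS AND PROOFS =====

-- A's loop, written as one flatMap over the indices
theorem analisar_combinacoes_eq_flatMap (ids : List Int) (n : Int) (h : ¬ n = 0) :
    analisar_combinacoes ids n =
      (List.range ids.length).flatMap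
        (fun i => (analisar_combinacoes (ids.drop (i + 1)) (n - 1)).map
          (fun p => ids.getD i 0 :: p)) := by
  rw [analisar_combinacoes]
  simp only [h, if_false]
  rw [List.foldl_attach (f := fun combinacoes i =>
        combinacoes ++ (analisar_combinacoes (ids.drop (i + 1)) (n - 1)).map
          (fun p => ids.getD i 0 :: p)),
      PySem.List.foldl_append_eq_flatMap]
  simp

theorem analisar_combinacoes_eq_alt (ids : List Int) (n : Int) :
    analisar_combinacoes ids n = analisar_combinacoes_alt ids n := by
  induction ids generalizing n with
  | nil =>
    by_cases h : n = 0
    · subst h; rw [analisar_combinacoes, analisar_combinacoes_alt]; simp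
    · rw [analisar_combinacoes_eq_flatMap _ _ h, analisar_combinacoes_alt]
      simp [h]
  | cons x rest ih =>
    by_cases h : n = 0
    · subst h; rw [analisar_combinacoes, analisar_combinacoes_alt]; simp
    · rw [analisar_combinacoes_eq_flatMap _ _ h, analisar_combinacoes_alt]
      simp only [h, if_false]
      rw [List.length_cons, List.range_succ_eq_map, List.flatMap_cons, List.flatMap_map]
      simp only [List.getD_cons_zero, List.getD_cons_succ, List.drop_succ_cons, List.drop_zero]
      rw [← analisar_combinacoes_eq_flatMap rest n h, ih, ih]

-- ===== VERDICT (by name: the statement is the Claim_ definition above) =====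
theorem analisar_combinacoes_spec : Claim_equal_analisar_combinacoes := by
  intro ids n _
  exact analisar_combinacoes_eq_alt ids n
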